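-- pv_equiv track=rewrite | github.com/YaelGrinstein/detecto_camera | evaluation.py | map_barcode_to_labels
-- ===== SOURCE A (Python) =====
-- def map_barcode_to_labels(barcode_labels, predictions):
--     id_order = {id: i for i, id in enumerate(barcode_labels)}
--     new_label = 0
--     labels = []
--     for label in predictions:
--         id = label.split('_')[0]
--         if id not in id_order:
--             id_order[id] = new_label
--             new_label += 1
--         labels.append(str(id_order[id]))
--
--     return labels
-- ===== SOURCE B (Python) =====
-- def map_barcode_to_labels(barcode_labels, predictions):
--     # Pass 1: extract all prediction ids, keep the unknown ones in first-occurrence order.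
--     known = {b: i for i, b in enumerate(barcode_labels)}
--     ids = [p.split('_')[0] for p in predictions]
--     extras = [pid for pid in dict.fromkeys(ids) if pid not in known]
--     # Pass 2: build the complete id->label table once, then emit all labels.
--     table = dict(known)
--     for j, pid in enumerate(extras):
--         table[pid] = j
--     return [str(table[pid]) for pid in ids]
-- ===== Notes on version B (the rewrite author's own statement) =====
-- stated objective: idiomatic
-- what changed: Two-pass decomposition: dedup all prediction ids with dict.fromkeys and filter out the known ones to get the new ids in first-occurrence order, build the complete id->label table once, then emit every label in a single comprehension, instead of interleaving conditional table updates, a counter and label emission in one loop.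
import Mathlib
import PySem

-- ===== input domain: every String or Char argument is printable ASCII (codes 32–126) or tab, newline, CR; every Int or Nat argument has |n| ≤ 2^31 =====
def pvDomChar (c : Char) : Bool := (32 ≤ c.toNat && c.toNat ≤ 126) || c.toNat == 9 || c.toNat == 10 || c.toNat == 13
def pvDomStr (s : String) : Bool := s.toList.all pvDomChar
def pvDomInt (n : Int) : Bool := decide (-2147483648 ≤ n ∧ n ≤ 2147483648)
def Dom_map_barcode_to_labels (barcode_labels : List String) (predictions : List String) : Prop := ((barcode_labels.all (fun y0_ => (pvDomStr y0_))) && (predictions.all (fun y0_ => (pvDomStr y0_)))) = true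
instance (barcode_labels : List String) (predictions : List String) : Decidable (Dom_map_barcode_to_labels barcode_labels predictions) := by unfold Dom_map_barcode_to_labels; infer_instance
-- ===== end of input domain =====

-- B replaces A's single interleaved loop by a two-pass decomposition: collect unseen ids first,
-- build the full id->label table once, then emit every label in one map (alternative, not faster).


-- shared helper of both sources: label.split('_')[0]; split with a nonempty separator never
-- returns an empty list, so index [0] is exactly the head (headD's default is unreachable)
def bkey (p : String) : String := ((PySem.Str.split? p "_").getD []).headD ""

-- shared helper of both sources: {id: i for i, id in enumerate(barcode_labels)}
def mkKnown (bl : List String) : PySem.Dict String Int :=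
  (PySem.List.enumerate bl).foldl (fun d iv => d.insert iv.2 iv.1) PySem.Dict.empty

-- ===== PORT A =====
-- loop body of A: split, conditionally insert with the running counter, append str(id_order[id])
def aStep (st : PySem.Dict String Int × Int × List String) (label : String) :
    PySem.Dict String Int × Int × List String :=
  let id := bkey label
  if st.1.contains id = false then
    (st.1.insert id st.2.1, st.2.1 + 1,
      st.2.2 ++ [PySem.Int.toStr ((st.1.insert id st.2.1).getD id 0)])
  else
    (st.1, st.2.1, st.2.2 ++ [PySem.Int.toStr (st.1.getD id 0)])

def map_barcode_to_labels (barcode_labels : List String) (predictions : List String) : List String :=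
  (predictions.foldl aStep (mkKnown barcode_labels, 0, [])).2.2

-- ===== PORT B =====
-- B's table-building loop: for j, pid in enumerate(extras, start=s): table[pid] = j
def btf (s : Int) (d : PySem.Dict String Int) (ex : List String) : PySem.Dict String Int :=
  (PySem.List.enumerate ex s).foldl (fun d ju => d.insert ju.2 ju.1) d

def map_barcode_to_labels_alt (barcode_labels : List String) (predictions : List String) : List String :=
  let known := mkKnown barcode_labels
  let ids := predictions.map bkey
  -- [pid for pid in dict.fromkeys(ids) if pid not in known]
  let extras := (PySem.List.dedup ids).filter (fun pid => !known.contains pid)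
  let table := btf 0 known extras
  -- table[pid]: the key is always present (in known or extras), so getD's default is unreachable
  ids.map (fun pid => PySem.Int.toStr (table.getD pid 0))

-- ===== PRECONDITION & SPEC =====
def Spec_map_barcode_to_labels (barcode_labels : List String) (predictions : List String) (out : List String) : Prop := out = map_barcode_to_labels_alt barcode_labels predictions
instance (barcode_labels : List String) (predictions : List String) (out : List String) : Decidable (Spec_map_barcode_to_labels barcode_labels predictions out) := by unfold Spec_map_barcode_to_labels; infer_instance

-- ===== CLAIM (what is proved, stated in full; the proofs are below) =====
def Claim_equal_map_barcode_to_labels : Prop := ∀ (barcode_labels : List String) (predictions : List String), Dom_map_barcode_to_labels barcode_labels predictions → Spec_map_barcode_to_labels barcode_labels predictions (map_barcode_to_labels barcode_labels predictions)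

-- ===== LEMMAS AND PROOFS =====

-- proof-only reformulation of A's discovery of new ids, one appended per unseen prediction
def exStep (known : PySem.Dict String Int) (ex : List String) (p : String) : List String :=
  let pid := bkey p
  if known.contains pid = false ∧ ex.contains pid = false then ex ++ [pid] else ex


theorem btf_nil (s : Int) (d : PySem.Dict String Int) : btf s d [] = d := rfl

theorem btf_cons (s : Int) (d : PySem.Dict String Int) (x : String) (t : List String) :
    btf s d (x :: t) = btf (s + 1) (d.insert x s) t := by
  simp [btf, PySem.List.enumerate_cons]

theorem btf_append (s : Int) (d : PySem.Dict String Int) (l₁ l₂ : List String) :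
    btf s d (l₁ ++ l₂) = btf (s + l₁.length) (btf s d l₁) l₂ := by
  simp [btf, PySem.List.enumerate_append, List.foldl_append]

theorem btf_singleton (s : Int) (d : PySem.Dict String Int) (x : String) :
    btf s d [x] = d.insert x s := by
  simp [btf, PySem.List.enumerate_cons, PySem.List.enumerate_nil]

theorem get?_btf_not_mem {id : String} {ex : List String} (h : id ∉ ex) :
    ∀ (s : Int) (d : PySem.Dict String Int), (btf s d ex).get? id = d.get? id := by
  induction ex with
  | nil => intro s d; rfl
  | cons x t ih =>
    intro s d
    rw [btf_cons]
    rw [ih (fun hm => h (List.mem_cons_of_mem _ hm))]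
    exact PySem.Dict.get?_insert_of_ne d s
      (fun he => h (he ▸ List.mem_cons_self))

theorem contains_btf (id : String) (ex : List String) :
    ∀ (s : Int) (d : PySem.Dict String Int),
      (btf s d ex).contains id = (d.contains id || ex.contains id) := by
  induction ex with
  | nil => intro s d; simp [btf_nil]
  | cons x t ih =>
    intro s d
    rw [btf_cons, ih]
    by_cases hx : id = x
    · subst hx
      simp
    · have hbx : (id == x) = false := beq_eq_false_iff_ne.mpr hx
      simp [PySem.Dict.contains_insert, hbx, hx]

theorem foldEx_spec (known : PySem.Dict String Int) :
    ∀ (ps : List String) (ex : List String), ex.Nodup →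
      ∃ t, ps.foldl (exStep known) ex = ex ++ t ∧ (ex ++ t).Nodup ∧
        ∀ x ∈ t, known.contains x = false := by
  intro ps
  induction ps with
  | nil => intro ex hnd; exact ⟨[], by simp, by simpa using hnd, by simp⟩
  | cons p ps ih =>
    intro ex hnd
    by_cases hg : known.contains (bkey p) = false ∧ ex.contains (bkey p) = false
    · have hnm : bkey p ∉ ex := by simpa using hg.2
      have hstep : exStep known ex p = ex ++ [bkey p] := by simp [exStep, hg.1, hnm]
      have hnd' : (ex ++ [bkey p]).Nodup := by
        rw [List.nodup_append]
        refine ⟨hnd, List.nodup_singleton _, ?_⟩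
        intro a ha b hbm
        rw [List.mem_singleton] at hbm
        subst hbm
        intro hEq
        exact hnm (hEq ▸ ha)
      obtain ⟨t, h1, h2, h3⟩ := ih (ex ++ [bkey p]) hnd'
      refine ⟨[bkey p] ++ t, ?_, ?_, ?_⟩
      · simpa [hstep, List.append_assoc] using h1
      · simpa [List.append_assoc] using h2
      · intro x hx
        rcases List.mem_append.mp hx with hx | hx
        · simp at hx; subst hx; exact hg.1
        · exact h3 x hx
    · have hstep : exStep known ex p = ex := by
        simp only [exStep]; rw [if_neg hg]
      rw [List.foldl_cons, hstep]
      exact ih ex hnd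

-- one A-step from the invariant state, phrased through btf and exStep
theorem mainA (known : PySem.Dict String Int) :
    ∀ (ps ex acc : List String), ex.Nodup → (∀ x ∈ ex, known.contains x = false) →
      (ps.foldl aStep (btf 0 known ex, (ex.length : Int), acc)).2.2
        = acc ++ ps.map (fun p => PySem.Int.toStr
            ((btf 0 known (ps.foldl (exStep known) ex)).getD (bkey p) 0)) := by
  intro ps
  induction ps with
  | nil => intro ex acc _ _; simp
  | cons p ps ih =>
    intro ex acc hnd hdisj
    set id := bkey p with hid
    by_cases hc : (btf 0 known ex).contains id = false
    · -- new id: A inserts it with counter ex.length; B's pass 1 appends it to extras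
      have hor : (known.contains id || ex.contains id) = false := by
        rw [← contains_btf id ex 0 known]; exact hc
      obtain ⟨hk, hexc⟩ := Bool.or_eq_false_iff.mp hor
      have hnm : id ∉ ex := by simpa using hexc
      have hstep : exStep known ex p = ex ++ [id] := by simp [exStep, ← hid, hk, hnm]
      have hins : (btf 0 known ex).insert id (ex.length : Int) = btf 0 known (ex ++ [id]) := by
        rw [btf_append, btf_singleton]; simp
      have hastep : aStep (btf 0 known ex, (ex.length : Int), acc) p
          = (btf 0 known (ex ++ [id]), ((ex ++ [id]).length : Int),
              acc ++ [PySem.Int.toStr ((btf 0 known (ex ++ [id])).getD id 0)]) := by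
        simp only [aStep, ← hid, hc, hins]
        simp
      have hnd' : (ex ++ [id]).Nodup := by
        rw [List.nodup_append]
        refine ⟨hnd, List.nodup_singleton _, ?_⟩
        intro a ha b hbm
        rw [List.mem_singleton] at hbm
        subst hbm
        intro hEq
        exact hnm (hEq ▸ ha)
      have hdisj' : ∀ x ∈ ex ++ [id], known.contains x = false := by
        intro x hx
        rcases List.mem_append.mp hx with hx | hx
        · exact hdisj x hx
        · simp at hx; subst hx; exact hk
      have ihh := ih (ex ++ [id]) (acc ++ [PySem.Int.toStr ((btf 0 known (ex ++ [id])).getD id 0)]) hnd' hdisj'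
      -- stability of the emitted value under the rest of pass 1
      obtain ⟨t, ht1, ht2, ht3⟩ := foldEx_spec known ps (ex ++ [id]) hnd'
      have hnmt : id ∉ t := by
        intro hmem
        exact (List.nodup_append.mp ht2).2.2 id (List.mem_append.mpr (Or.inr (List.mem_singleton.mpr rfl))) id hmem rfl
      have hstab : (btf 0 known (ps.foldl (exStep known) (ex ++ [id]))).getD id 0
          = (btf 0 known (ex ++ [id])).getD id 0 := by
        rw [ht1, btf_append]
        rw [PySem.Dict.getD_eq_get?_getD, PySem.Dict.getD_eq_get?_getD,
          get?_btf_not_mem hnmt]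
      rw [List.foldl_cons, List.foldl_cons, hastep, hstep, ihh]
      rw [List.map_cons, ← hid, ← hstab]
      simp
    · -- known id: dict and counter unchanged on both sides
      have hor : (known.contains id || ex.contains id) = true := by
        rw [← contains_btf id ex 0 known]
        cases h : (btf 0 known ex).contains id
        · exact absurd h hc
        · rfl
      have hstep : exStep known ex p = ex := by
        simp only [exStep, ← hid]
        rw [if_neg]
        intro ⟨h1, h2⟩; rw [h1, h2] at hor; simp at hor
      have hastep : aStep (btf 0 known ex, (ex.length : Int), acc) p
          = (btf 0 known ex, (ex.length : Int),
              acc ++ [PySem.Int.toStr ((btf 0 known ex).getD id 0)]) := by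
        simp only [aStep, ← hid, hc]
        simp
      have ihh := ih ex (acc ++ [PySem.Int.toStr ((btf 0 known ex).getD id 0)]) hnd hdisj
      obtain ⟨t, ht1, ht2, ht3⟩ := foldEx_spec known ps ex hnd
      have hnmt : id ∉ t := by
        intro hmem
        cases h : known.contains id
        · -- id came from ex; Nodup (ex ++ t) forbids it in t
          have hm : id ∈ ex := by
            rw [h] at hor; simpa [List.contains_eq_mem] using hor
          rw [List.nodup_append] at ht2
          exact ht2.2.2 id hm id hmem rfl
        · exact absurd (ht3 id hmem) (by simp [h])
      have hstab : (btf 0 known (ps.foldl (exStep known) ex)).getD id 0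
          = (btf 0 known ex).getD id 0 := by
        rw [ht1, btf_append]
        rw [PySem.Dict.getD_eq_get?_getD, PySem.Dict.getD_eq_get?_getD,
          get?_btf_not_mem hnmt]
      rw [List.foldl_cons, List.foldl_cons, hastep, hstep, ihh]
      rw [List.map_cons, ← hid, ← hstab]
      simp

-- A's interleaved discovery of new ids equals B's dedup-then-filter pass
theorem bridge (known : PySem.Dict String Int) :
    ∀ (l ds : List String), ds.Nodup →
      l.foldl (fun ex id => if known.contains id = false ∧ ex.contains id = false
                            then ex ++ [id] else ex)
        (ds.filter (fun pid => !known.contains pid))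
      = (PySem.Set.update ds l).filter (fun pid => !known.contains pid) := by
  intro l
  induction l with
  | nil => intro ds _; simp [PySem.Set.update_nil]
  | cons x t ih =>
    intro ds hnd
    rw [List.foldl_cons, PySem.Set.update_cons]
    by_cases hmem : x ∈ ds
    · rw [PySem.Set.add_of_mem hmem]
      rw [if_neg ?_]
      · exact ih ds hnd
      · rintro ⟨h1, h2⟩
        have hxf : x ∈ ds.filter (fun pid => !known.contains pid) :=
          List.mem_filter.mpr ⟨hmem, by simp [h1]⟩
        simp [List.contains_eq_mem, hxf] at h2
    · rw [PySem.Set.add_of_not_mem hmem]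
      have hnd' : (ds ++ [x]).Nodup := by
        rw [List.nodup_append]
        refine ⟨hnd, List.nodup_singleton _, ?_⟩
        intro a ha b hbm
        rw [List.mem_singleton] at hbm
        subst hbm
        intro hEq
        exact hmem (hEq ▸ ha)
      have hxnf : x ∉ ds.filter (fun pid => !known.contains pid) :=
        fun hx => hmem (List.mem_filter.mp hx).1
      by_cases hk : known.contains x = false
      · rw [if_pos ⟨hk, by simpa using hxnf⟩]
        have : (ds ++ [x]).filter (fun pid => !known.contains pid)
            = ds.filter (fun pid => !known.contains pid) ++ [x] := by
          simp [List.filter_append, hk]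
        rw [← this]
        exact ih (ds ++ [x]) hnd'
      · rw [if_neg (fun h => hk h.1)]
        have : (ds ++ [x]).filter (fun pid => !known.contains pid)
            = ds.filter (fun pid => !known.contains pid) := by
          have hkt : known.contains x = true := by
            cases h : known.contains x
            · exact absurd h hk
            · rfl
          simp [List.filter_append, hkt]
        rw [← this]
        exact ih (ds ++ [x]) hnd'

-- ===== VERDICT (by name: the statement is the Claim_ definition above) =====
theorem map_barcode_to_labels_spec : Claim_equal_map_barcode_to_labels := by
  intro bl ps _
  show map_barcode_to_labels bl ps = map_barcode_to_labels_alt bl ps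
  unfold map_barcode_to_labels map_barcode_to_labels_alt
  have h := mainA (mkKnown bl) ps [] [] List.nodup_nil (by simp)
  rw [btf_nil] at h
  have hfold : ps.foldl (exStep (mkKnown bl)) []
      = (PySem.List.dedup (ps.map bkey)).filter (fun pid => !(mkKnown bl).contains pid) := by
    have hb := bridge (mkKnown bl) (ps.map bkey) [] List.nodup_nil
    simp only [List.filter_nil] at hb
    rw [PySem.Set.update_nil_left] at hb
    rw [← PySem.List.dedup_eq_ofList] at hb
    rw [← hb, List.foldl_map]
    rfl
  rw [hfold] at h
  simpa [List.map_map, Function.comp] using h
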